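/- GENERATED by farm/mkstatement.py from design/units.tsv (unit `vorbis_decode_packet_rest.1a`) and the assertions of Vorbis/Spec/PacketRest1.lean — do not edit.
   THE STATEMENT of the proof unit `vorbis_decode_packet_rest.1a`: segment 1a of `vorbis_decode_packet_rest` (32 instructions; entries 0x110b00;
   exits 0x110bda; ranges 0x110b00-0x110bd0)
   takes each of its entry assertions to one of its exit assertions (`Vorbis.Spec.vorbis_decode_packet_rest.Seg1a`), given the contracts of its callees.
   What the names mean: Vorbis/Spec/Basic.lean (the shared hypotheses), Vorbis/Spec/PacketRest1.lean (the assertions). The theorem to prove: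
   `theorem vorbis_decode_packet_rest_1a_ok : Vorbis.Spec.vorbis_decode_packet_rest_1a.Statement`. -/
import Vorbis.Spec.PacketRest1
namespace Vorbis.Spec.vorbis_decode_packet_rest_1a
open X86 X86.User Asan

/-- The statement of unit `vorbis_decode_packet_rest.1a`. -/
def Statement : Prop :=
  ∀ (Lay : Layout) (_hLay : Lay.hi = 0x1000000) (μ : Microarch) (_hμ : UserX.MicroOK μ) (u₀ : State)
    (_hcode : HasCodeNat Lay u₀ Vorbis.L.vorbis_decode_packet_rest.entry Vorbis.Code.code_vorbis_decode_packet_rest.nat Vorbis.L.vorbis_decode_packet_rest.size),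
    Vorbis.Spec.vorbis_decode_packet_rest.Seg1a Lay μ u₀

end Vorbis.Spec.vorbis_decode_packet_rest_1a
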